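-- pv_equiv track=rewrite | github.com/MontelioneLab/CSP_UBQ | scripts/receptor_msa.py | _gap_profile
-- ===== SOURCE A (Python) =====
-- from typing import List, Optional, Tuple
--
-- def _gap_profile(C: str, center: str) -> List[int]:
--     """
--     Return ``gaps[k]`` = gap count before residue ``k`` for k in ``0..L-1``,
--     and ``gaps[L]`` = trailing gaps after the last residue.
--     """
--     L = len(center)
--     gaps = [0] * (L + 1)
--     i = 0
--     while i < len(C) and C[i] == "-":
--         gaps[0] += 1
--         i += 1
--     for r in range(L):
--         if i >= len(C) or C[i].upper() != center[r].upper():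
--             raise ValueError("truncated gapped center string or residue mismatch")
--         i += 1
--         if r < L - 1:
--             g = 0
--             while i < len(C) and C[i] == "-":
--                 g += 1
--                 i += 1
--             gaps[r + 1] = g
--         else:
--             tr = 0
--             while i < len(C) and C[i] == "-":
--                 tr += 1
--                 i += 1
--             gaps[L] = tr
--     if i != len(C):
--         raise ValueError("extra characters in gapped center string")
--     return gaps
-- ===== SOURCE B (Python) =====
-- from typing import List
--
-- def _gap_profile(C: str, center: str) -> List[int]:
--     L = len(center)
--     gaps = [0] * (L + 1)
--     r = 0
--     for c in C:
--         if c == "-":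
--             gaps[r] += 1
--         elif r < L and c.upper() == center[r].upper():
--             r += 1
--         elif r < L:
--             raise ValueError("truncated gapped center string or residue mismatch")
--         else:
--             raise ValueError("extra characters in gapped center string")
--     if r != L:
--         raise ValueError("truncated gapped center string or residue mismatch")
--     return gaps
-- ===== Notes on version B (the rewrite author's own statement) =====
-- stated objective: simpler
-- what changed: Replaced the leading-gap while loop plus per-residue nested gap-counting while loops (index-driven) with a single flat loop over the characters of C that maintains a residue counter r and increments gaps[r] on each gap character.
import Mathlib
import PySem

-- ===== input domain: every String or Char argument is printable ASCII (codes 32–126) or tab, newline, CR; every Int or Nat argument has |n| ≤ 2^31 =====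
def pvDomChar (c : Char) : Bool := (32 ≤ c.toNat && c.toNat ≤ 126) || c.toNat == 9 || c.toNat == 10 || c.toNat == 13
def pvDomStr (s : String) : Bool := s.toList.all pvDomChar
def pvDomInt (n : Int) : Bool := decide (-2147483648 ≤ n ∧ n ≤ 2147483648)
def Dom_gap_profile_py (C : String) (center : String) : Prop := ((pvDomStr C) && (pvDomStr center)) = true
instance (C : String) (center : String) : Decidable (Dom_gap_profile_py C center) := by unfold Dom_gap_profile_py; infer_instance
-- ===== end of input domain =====

-- B replaces A's leading-gap loop plus per-residue nested gap loops with one flat pass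
-- over C maintaining a residue counter (objective: simpler). Equivalence on Pre_ (where A returns).

-- ===== PORT A =====
-- while i < len(C) and C[i] == "-": count += 1; i += 1   (returns the count and the rest)
def pvCountGaps : List Char → Nat × List Char
  | [] => (0, [])
  | c :: cs => if c = '-' then
      let p := pvCountGaps cs
      (p.1 + 1, p.2)
    else (0, c :: cs)

-- the 'for r in range(L)' loop of A: remaining C after the gaps already consumed,
-- remaining center residues; builds gaps[r+1..] ; none = raise.
-- (A's r < L-1 / last-residue branches run the identical gap-counting while loop,
--  writing to gaps[r+1] resp. gaps[L]; both are the cons below.)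
def pvLoopA : List Char → List Char → Option (List Int)
  | cs, [] => if cs = [] then some [] else none   -- final 'if i != len(C): raise'
  | cs, k :: ks =>
    match cs with
    | [] => none                                   -- truncated
    | c :: cs' =>
      if c.toUpper = k.toUpper then
        let p := pvCountGaps cs'
        (pvLoopA p.2 ks).map (fun t => ((p.1 : Int)) :: t)
      else none                                    -- residue mismatch

def gap_profile_py (C : String) (center : String) : List Int :=
  let p := pvCountGaps C.toList                    -- leading gaps → gaps[0]
  match pvLoopA p.2 center.toList with
  | some t => (p.1 : Int) :: t
  | none => []                                     -- unreachable under Pre_ (Python raises)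

-- ===== PORT B =====
-- one flat pass: g = gaps[r] being accumulated, ks = center residues not yet matched
def pvLoopB : List Char → List Char → Int → Option (List Int)
  | [], ks, g => match ks with
    | [] => some [g]                               -- r == L at end
    | _ :: _ => none                               -- r != L: truncated
  | c :: cs, ks, g =>
    if c = '-' then pvLoopB cs ks (g + 1)          -- gaps[r] += 1
    else match ks with
      | [] => none                                 -- extra characters
      | k :: ks' =>
        if c.toUpper = k.toUpper then (pvLoopB cs ks' 0).map (fun t => g :: t)  -- r += 1
        else none                                  -- mismatch

def gap_profile_py_alt (C : String) (center : String) : List Int :=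
  (pvLoopB C.toList center.toList 0).getD []

-- ===== PRECONDITION & SPEC =====
-- Pre_ = exactly the inputs on which Python A returns (otherwise it raises ValueError):
-- C with its '-' characters removed equals center, case-insensitively.
def Pre_gap_profile_py (C : String) (center : String) : Prop :=
  (C.toList.filter (fun c => c ≠ '-')).map Char.toUpper = center.toList.map Char.toUpper
instance (C : String) (center : String) : Decidable (Pre_gap_profile_py C center) := by
  unfold Pre_gap_profile_py; infer_instance
def pvWitness_gap_profile_py : String × String := ("-A-b--C", "ABc")

def Spec_gap_profile_py (C : String) (center : String) (out : List Int) : Prop := out = gap_profile_py_alt C center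
instance (C : String) (center : String) (out : List Int) : Decidable (Spec_gap_profile_py C center out) := by unfold Spec_gap_profile_py; infer_instance

-- ===== CLAIM (what is proved, stated in full; the proofs are below) =====
def Claim_equal_gap_profile_py : Prop := ∀ (C : String) (center : String), Dom_gap_profile_py C center → Pre_gap_profile_py C center → Spec_gap_profile_py C center (gap_profile_py C center)

-- ===== LEMMAS AND PROOFS =====

-- The two loop shapes agree everywhere (even where both signal a raise):
-- B's flat pass with accumulator g equals "consume gaps, then run A's residue loop".
lemma pvLoopB_eq (cs : List Char) : ∀ (ks : List Char) (g : Int),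
    pvLoopB cs ks g =
      (pvLoopA (pvCountGaps cs).2 ks).map (fun t => (g + ((pvCountGaps cs).1 : Int)) :: t) := by
  induction cs with
  | nil =>
    intro ks g
    cases ks with
    | nil => simp [pvLoopB, pvLoopA, pvCountGaps]
    | cons k ks' => simp [pvLoopB, pvLoopA, pvCountGaps]
  | cons c cs' ih =>
    intro ks g
    by_cases hc : c = '-'
    · simp only [pvLoopB, pvCountGaps, hc]
      rw [ih ks (g + 1)]
      cases h : pvLoopA (pvCountGaps cs').2 ks <;>
        simp [h]; ring_nf
    · cases ks with
      | nil =>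
        simp [pvLoopB, pvLoopA, pvCountGaps, hc]
      | cons k ks' =>
        by_cases hm : c.toUpper = k.toUpper
        · simp only [pvLoopB, pvCountGaps, hc, if_pos hm]
          rw [ih ks' 0]
          cases h : pvLoopA (pvCountGaps cs').2 ks' <;> simp [pvLoopA, hm, h]
        · simp [pvLoopB, pvLoopA, pvCountGaps, hc, hm]

lemma ports_eq (C center : String) : gap_profile_py C center = gap_profile_py_alt C center := by
  unfold gap_profile_py gap_profile_py_alt
  rw [pvLoopB_eq]
  cases h : pvLoopA (pvCountGaps C.toList).2 center.toList <;> simp [h]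

-- ===== VERDICT (by name: the statement is the Claim_ definition above) =====
theorem gap_profile_py_spec : Claim_equal_gap_profile_py := by
  intro C center _ _
  unfold Spec_gap_profile_py
  exact ports_eq C center
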